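-- pv_equiv track=rewrite | github.com/sezangel/BPDA-Code-Dataset | Code/SinkLens/test1.py | find_matching_paths
-- ===== SOURCE A (Python) =====
-- def is_subsequence(main_list, sub_list):
--     """检查sub_list是否是main_list的子序列"""
--     it = iter(main_list)
--     return all(item in it for item in sub_list)
--
-- def find_matching_paths(main_paths, path_sequences):
--     """查找路径序列列表中是否存在于主路径列表中的子序列"""
--     matching_paths = []
--
--     for path_group in path_sequences:
--         group_match = True
--         for path in path_group:
--             path_set = set(path)
--             match_found = False
--             for main_path in main_paths:
--                 main_path_set = set(main_path)
--                 if path_set <= main_path_set and is_subsequence(main_path, path):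
--                     match_found = True
--                     break
--             if not match_found:
--                 group_match = False
--                 break
--         if group_match:
--             return True
--
--     return False
-- ===== SOURCE B (Python) =====
-- def _bisect_right(a, x):
--     lo, hi = 0, len(a)
--     while lo < hi:
--         mid = (lo + hi) // 2
--         if x < a[mid]:
--             hi = mid
--         else:
--             lo = mid + 1
--     return lo
--
-- def _build_index(main_path):
--     idx = {}
--     i = 0
--     for v in main_path:
--         idx.setdefault(v, []).append(i)
--         i += 1
--     return idx
--
-- def _is_subseq(idx, path):
--     pos = -1
--     for x in path:
--         ps = idx.get(x, [])
--         k = _bisect_right(ps, pos)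
--         if k == len(ps):
--             return False
--         pos = ps[k]
--     return True
--
-- def find_matching_paths(main_paths, path_sequences):
--     indexes = [_build_index(mp) for mp in main_paths]
--     for path_group in path_sequences:
--         if all(any(_is_subseq(idx, path) for idx in indexes) for path in path_group):
--             return True
--     return False
-- ===== Notes on version B (the rewrite author's own statement) =====
-- stated objective: faster
-- what changed: Instead of rebuilding a set and greedily rescanning each main path element-by-element for every candidate path, B precomputes one element->sorted-positions index per main path and tests subsequence membership by binary-searching each element's position list for the next usable position, dropping A's redundant set-subset pre-guard.
import Mathlib
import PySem

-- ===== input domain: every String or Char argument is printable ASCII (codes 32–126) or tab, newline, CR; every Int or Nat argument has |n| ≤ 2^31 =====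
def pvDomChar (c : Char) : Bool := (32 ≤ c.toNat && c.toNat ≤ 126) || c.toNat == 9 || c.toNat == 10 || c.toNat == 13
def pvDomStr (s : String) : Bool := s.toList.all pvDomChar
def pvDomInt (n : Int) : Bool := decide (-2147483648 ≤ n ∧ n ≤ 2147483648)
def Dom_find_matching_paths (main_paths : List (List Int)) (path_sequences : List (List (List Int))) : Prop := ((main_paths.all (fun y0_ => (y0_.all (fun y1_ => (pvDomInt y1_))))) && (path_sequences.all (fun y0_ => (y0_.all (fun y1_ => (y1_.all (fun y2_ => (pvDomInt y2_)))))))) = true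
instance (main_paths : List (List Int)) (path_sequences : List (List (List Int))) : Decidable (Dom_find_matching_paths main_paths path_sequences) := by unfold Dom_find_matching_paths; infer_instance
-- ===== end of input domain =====

-- B replaces A's per-path rescans of every main path (set build + iterator scan each time) by a
-- positions index per main path queried with binary search; proved to return the same Bool always.

-- ===== PORT A =====
-- `x in it` on an iterator: consume until x is found, returning the remainder (none = exhausted).
def findAfter : List Int → Int → Option (List Int)
  | [], _ => none
  | y :: ys, x => if y = x then some ys else findAfter ys x

-- the generator `all(item in it for item in sub_list)` over the shared iterator
def is_subsequence_go : List Int → List Int → Bool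
  | _, [] => true
  | it, x :: xs =>
    match findAfter it x with
    | none => false
    | some it' => is_subsequence_go it' xs

def is_subsequence (main_list sub_list : List Int) : Bool :=
  is_subsequence_go main_list sub_list

def find_matching_paths (main_paths : List (List Int)) (path_sequences : List (List (List Int))) : Bool :=
  path_sequences.any (fun path_group =>
    path_group.all (fun path =>
      main_paths.any (fun main_path =>
        (PySem.Set.ofList path).issubset (PySem.Set.ofList main_path)
          && is_subsequence main_path path)))

-- ===== PORT B =====
-- the loop `for v in main_path: idx[v] = idx.get(v, []) + [i]; i += 1`
def build_index_go : PySem.Dict Int (List Int) → List Int → Int → PySem.Dict Int (List Int)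
  | idx, [], _ => idx
  | idx, v :: vs, i => build_index_go (idx.insert v (idx.getD v [] ++ [i])) vs (i + 1)

def build_index (main_path : List Int) : PySem.Dict Int (List Int) :=
  build_index_go PySem.Dict.empty main_path 0

-- _bisect_right in Source B is the standard lo/hi binary-search loop, ported as PySem.List.bisectRight
-- (the same loop, step for step).
def is_subseq_go (idx : PySem.Dict Int (List Int)) : List Int → Int → Bool
  | [], _ => true
  | x :: xs, pos =>
    let ps := idx.getD x []
    let k := PySem.List.bisectRight ps pos
    if k = ps.length then false
    else is_subseq_go idx xs (ps.getD k 0)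

def is_subseq (idx : PySem.Dict Int (List Int)) (path : List Int) : Bool :=
  is_subseq_go idx path (-1)

def find_matching_paths_alt (main_paths : List (List Int)) (path_sequences : List (List (List Int))) : Bool :=
  let indexes := main_paths.map build_index
  path_sequences.any (fun path_group =>
    path_group.all (fun path =>
      indexes.any (fun idx => is_subseq idx path)))

-- ===== PRECONDITION & SPEC =====
def Spec_find_matching_paths (main_paths : List (List Int)) (path_sequences : List (List (List Int))) (out : Bool) : Prop := out = find_matching_paths_alt main_paths path_sequences
instance (main_paths : List (List Int)) (path_sequences : List (List (List Int))) (out : Bool) : Decidable (Spec_find_matching_paths main_paths path_sequences out) := by unfold Spec_find_matching_paths; infer_instance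

-- ===== CLAIM (what is proved, stated in full; the proofs are below) =====
def Claim_equal_find_matching_paths : Prop := ∀ (main_paths : List (List Int)) (path_sequences : List (List (List Int))), Dom_find_matching_paths main_paths path_sequences → Spec_find_matching_paths main_paths path_sequences (find_matching_paths main_paths path_sequences)

-- ===== LEMMAS AND PROOFS =====

-- posL l x n = the positions (offset by n) of the occurrences of x in l, in increasing order
def posL : List Int → Int → Int → List Int
  | [], _, _ => []
  | y :: ys, x, n => if y = x then n :: posL ys x (n + 1) else posL ys x (n + 1)

theorem posL_ge : ∀ (l : List Int) (x n p : Int), p ∈ posL l x n → n ≤ p := by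
  intro l
  induction l with
  | nil => intro x n p h; simp [posL] at h
  | cons y ys ih =>
    intro x n p h
    by_cases hy : y = x <;> simp [posL, hy] at h
    · rcases h with h | h
      · omega
      · have := ih x (n + 1) p h; omega
    · have := ih x (n + 1) p h; omega

theorem posL_pairwise : ∀ (l : List Int) (x n : Int), (posL l x n).Pairwise (· < ·) := by
  intro l
  induction l with
  | nil => intro x n; simp [posL]
  | cons y ys ih =>
    intro x n
    by_cases hy : y = x <;> simp [posL, hy]
    · exact ⟨fun p hp => by have := posL_ge ys x (n + 1) p hp; omega, ih x (n + 1)⟩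
    · exact ih x (n + 1)

theorem build_getD : ∀ (l : List Int) (idx : PySem.Dict Int (List Int)) (i x : Int),
    (build_index_go idx l i).getD x [] = idx.getD x [] ++ posL l x i := by
  intro l
  induction l with
  | nil => intro idx i x; simp [build_index_go, posL]
  | cons v vs ih =>
    intro idx i x
    rw [build_index_go, ih]
    rw [PySem.Dict.getD_insert]
    by_cases hx : x = v
    · subst hx; simp [posL]
    · have hv : v = x ↔ False := by constructor <;> intro h <;> simp_all
      simp [posL, hx, hv]

theorem build_index_posL (main : List Int) (x : Int) :
    (build_index main).getD x [] = posL main x 0 := by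
  rw [build_index, build_getD]; rfl

-- the greedy "find x in the remaining iterator" expressed through the positions list
theorem keyM : ∀ (l : List Int) (x pos n : Int),
    findAfter (l.drop (pos + 1 - n).toNat) x
      = ((posL l x n).dropWhile (fun p => decide (p ≤ pos))).head?.map
          (fun p => l.drop (p + 1 - n).toNat) := by
  intro l x pos
  induction l with
  | nil => intro n; simp [posL, findAfter]
  | cons y ys ih =>
    intro n
    have hdropHead :
        ((posL ys x (n + 1)).dropWhile (fun p => decide (p ≤ pos))).head?.map
            (fun p => (y :: ys).drop (p + 1 - n).toNat)
          = ((posL ys x (n + 1)).dropWhile (fun p => decide (p ≤ pos))).head?.map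
            (fun p => ys.drop (p + 1 - (n + 1)).toNat) := by
      cases hh : ((posL ys x (n + 1)).dropWhile (fun p => decide (p ≤ pos))).head? with
      | none => rfl
      | some p =>
        have hmem : p ∈ posL ys x (n + 1) :=
          (List.dropWhile_sublist _).subset (List.mem_of_mem_head? hh)
        have hp : n + 1 ≤ p := posL_ge ys x (n + 1) p hmem
        have h2 : (p + 1 - n).toNat = (p + 1 - (n + 1)).toNat + 1 := by omega
        simp only [Option.map_some, h2, List.drop_succ_cons]
    by_cases hc : pos < n
    · have h0 : (pos + 1 - n).toNat = 0 := by omega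
      rw [h0]
      by_cases hy : y = x
      · have hnpos : ¬ (n ≤ pos) := by omega
        simp [posL, hy, findAfter, hnpos]
      · have h0' : (pos + 1 - (n + 1)).toNat = 0 := by omega
        have hthis := ih (n + 1)
        rw [h0', List.drop_zero] at hthis
        simp only [posL, hy, if_false]
        rw [hdropHead]
        simpa [findAfter, hy] using hthis
    · have h1 : (pos + 1 - n).toNat = (pos + 1 - (n + 1)).toNat + 1 := by omega
      rw [h1, List.drop_succ_cons, ih (n + 1)]
      by_cases hy : y = x
      · have hnpos : (n ≤ pos) := by omega
        rw [hdropHead.symm]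
        simp [posL, hy, hnpos]
      · rw [hdropHead.symm]
        simp [posL, hy]

theorem dropWhile_eq_drop_of (ps : List Int) (P : Int → Bool) :
    ∀ (k : Nat), k ≤ ps.length → (∀ j (hj : j < ps.length), j < k → P ps[j] = true) →
      (∀ (hk : k < ps.length), P ps[k] = false) →
      ps.dropWhile P = ps.drop k := by
  induction ps with
  | nil => intro k hk _ _; simp
  | cons a as ih =>
    intro k hk hall hstop
    cases k with
    | zero =>
      have : P a = false := hstop (by simp)
      simp [List.dropWhile, this]
    | succ k' =>
      have ha : P a = true := hall 0 (by simp) (by omega)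
      simp only [List.dropWhile, ha, List.drop_succ_cons]
      exact ih k' (by simpa using hk)
        (fun j hj hjk => hall (j + 1) (by simpa using Nat.succ_lt_succ hj) (by omega))
        (fun hk' => hstop (by simpa using Nat.succ_lt_succ hk'))

-- the bisect step: dropWhile (· ≤ pos) ps = ps.drop (bisectRight ps pos) for sorted ps
theorem bisect_dropWhile (ps : List Int) (pos : Int) (hs : ps.Pairwise (· ≤ ·)) :
    ps.dropWhile (fun p => decide (p ≤ pos)) = ps.drop (PySem.List.bisectRight ps pos) := by
  obtain ⟨hle, hlt, hgt⟩ := PySem.List.bisectRight_spec ps pos hs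
  exact dropWhile_eq_drop_of ps _ _ hle
    (fun j hj hjk => by simpa using hlt j hj hjk)
    (fun hk => by simpa using hgt _ hk (le_refl _))

-- the per-path equivalence, generalized over the current iterator position
theorem subseq_eq (main : List Int) : ∀ (sub : List Int) (pos : Int),
    is_subseq_go (build_index main) sub pos
      = is_subsequence_go (main.drop (pos + 1).toNat) sub := by
  intro sub
  induction sub with
  | nil => intro pos; simp [is_subseq_go, is_subsequence_go]
  | cons x xs ih =>
    intro pos
    have hps : (build_index main).getD x [] = posL main x 0 := build_index_posL main x
    have hM := keyM main x pos 0
    have hsorted : (posL main x 0).Pairwise (· ≤ ·) :=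
      (posL_pairwise main x 0).imp (fun h => le_of_lt h)
    have hdrop := bisect_dropWhile (posL main x 0) pos hsorted
    rw [hdrop] at hM
    simp only [sub_zero] at hM
    set ps := posL main x 0 with hpsdef
    set k := PySem.List.bisectRight ps pos with hkdef
    obtain ⟨hle, -, -⟩ := PySem.List.bisectRight_spec ps pos hsorted
    rw [is_subseq_go]
    simp only [hps, ← hkdef]
    by_cases hkl : k = ps.length
    · have : ps.drop k = [] := by rw [hkl]; simp
      rw [this] at hM
      simp only [List.head?_nil, Option.map_none] at hM
      rw [is_subsequence_go, hM, if_pos hkl]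
    · have hklt : k < ps.length := lt_of_le_of_ne hle hkl
      have hhead : (ps.drop k).head? = some ps[k] := by
        rw [List.head?_drop]; simp [hklt]
      rw [hhead] at hM
      simp only [Option.map_some] at hM
      rw [is_subsequence_go, hM, if_neg hkl]
      have hgetD : ps.getD k 0 = ps[k] := List.getD_eq_getElem ps 0 hklt
      rw [hgetD, ih ps[k]]

-- a found element and the remaining iterator both live in the original list
theorem findAfter_mem (x : Int) : ∀ (main r : List Int), findAfter main x = some r →
    x ∈ main ∧ ∀ a ∈ r, a ∈ main := by
  intro main
  induction main with
  | nil => intro r h; simp [findAfter] at h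
  | cons y ys ih =>
    intro r h
    rw [findAfter] at h
    by_cases hy : y = x
    · rw [if_pos hy] at h
      injection h with h; subst h; subst hy
      exact ⟨by simp, fun a ha => by simp [ha]⟩
    · rw [if_neg hy] at h
      obtain ⟨h1, h2⟩ := ih r h
      exact ⟨by simp [h1], fun a ha => by simp [h2 a ha]⟩

theorem isub_mem : ∀ (sub main : List Int), is_subsequence_go main sub = true →
    ∀ a ∈ sub, a ∈ main := by
  intro sub
  induction sub with
  | nil => intro main _ a ha; simp at ha
  | cons x xs ih =>
    intro main h a ha
    rw [is_subsequence_go] at h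
    cases hf : findAfter main x with
    | none => rw [hf] at h; simp at h
    | some r =>
      rw [hf] at h
      obtain ⟨hx, hr⟩ := findAfter_mem x main r hf
      rcases List.mem_cons.mp ha with rfl | ha'
      · exact hx
      · exact hr a (ih r h a ha')

-- the redundant set-subset guard of A
theorem guard_redundant (path mp : List Int) :
    ((PySem.Set.ofList path).issubset (PySem.Set.ofList mp) && is_subsequence mp path)
      = is_subsequence mp path := by
  cases h : is_subsequence mp path with
  | false => simp
  | true =>
    simp only [Bool.and_true]
    rw [(PySem.Set.issubset_iff _ _)]
    intro a ha
    rw [PySem.Set.mem_ofList] at ha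
    rw [PySem.Set.mem_ofList]
    exact isub_mem path mp h a ha

theorem per_path (mp path : List Int) :
    is_subseq (build_index mp) path
      = ((PySem.Set.ofList path).issubset (PySem.Set.ofList mp) && is_subsequence mp path) := by
  rw [guard_redundant, is_subseq, subseq_eq]
  norm_num [is_subsequence]

-- ===== VERDICT (by name: the statement is the Claim_ definition above) =====
theorem find_matching_paths_spec : Claim_equal_find_matching_paths := by
  unfold Claim_equal_find_matching_paths
  intro main_paths path_sequences _
  unfold Spec_find_matching_paths find_matching_paths find_matching_paths_alt
  simp only [List.any_map]
  congr 1
  funext path_group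
  congr 1
  funext path
  congr 1
  funext mp
  exact (per_path mp path).symm
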